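-- pv_equiv track=rewrite | github.com/DABSO/Bachelor-Thesis-Repo | src/logit_processors.py | get_current_path_and_level
-- ===== SOURCE A (Python) =====
-- from typing import Dict, Any, List
-- from typing import Dict, List, Any, Union, Tuple
-- from typing import Dict, Any, List
-- from typing import Dict, Any, Tuple, List
--
-- def get_current_path_and_level(json_string: str) -> Tuple[List[str], int]:
--     stack = []
--     current_path = []
--     current_key = ""
--     in_string = False
--     escape_next = False
--
--     for char in json_string:
--         if escape_next:
--             escape_next = False
--             continue
--
--         if char == '"' and not escape_next:
--             in_string = not in_string
--             if not in_string and current_key: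
--                 current_path.append(current_key)
--                 current_key = ""
--         elif in_string:
--             if char == '\\':
--                 escape_next = True
--             else:
--                 current_key += char
--         elif char in '{[':
--             stack.append(char)
--         elif char in '}]':
--             if stack:
--                 stack.pop()
--             if current_path:
--                 current_path.pop()
--
--     return current_path, len(stack)
-- ===== SOURCE B (Python) =====
-- def _tokenize(json_string):
--     tokens = []
--     buf = ""
--     in_string = False
--     escape_next = False
--     for char in json_string:
--         if escape_next:
--             escape_next = False
--             continue
--         if char == '"':
--             if in_string:
--                 if buf:
--                     tokens.append(('key', buf))
--                     buf = ""
--                 in_string = False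
--             else:
--                 in_string = True
--         elif in_string:
--             if char == '\\':
--                 escape_next = True
--             else:
--                 buf += char
--         elif char in '{[':
--             tokens.append(('open',))
--         elif char in '}]':
--             tokens.append(('close',))
--     return tokens
--
--
-- def get_current_path_and_level(json_string):
--     depth = 0
--     path = []
--     for tok in _tokenize(json_string):
--         if tok[0] == 'key':
--             path.append(tok[1])
--         elif tok[0] == 'open':
--             depth += 1
--         else:
--             if depth:
--                 depth -= 1
--             if path:
--                 path.pop()
--     return path, depth
-- ===== Notes on version B (the rewrite author's own statement) =====
-- stated objective: alternative
-- what changed: Replaces the fused scan-and-update state machine with a two-phase design: a tokenizer that emits an ordered list of key/open/close tokens, then a reducer over that token list maintaining a path list and an integer depth counter instead of a bracket stack.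
import Mathlib
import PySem

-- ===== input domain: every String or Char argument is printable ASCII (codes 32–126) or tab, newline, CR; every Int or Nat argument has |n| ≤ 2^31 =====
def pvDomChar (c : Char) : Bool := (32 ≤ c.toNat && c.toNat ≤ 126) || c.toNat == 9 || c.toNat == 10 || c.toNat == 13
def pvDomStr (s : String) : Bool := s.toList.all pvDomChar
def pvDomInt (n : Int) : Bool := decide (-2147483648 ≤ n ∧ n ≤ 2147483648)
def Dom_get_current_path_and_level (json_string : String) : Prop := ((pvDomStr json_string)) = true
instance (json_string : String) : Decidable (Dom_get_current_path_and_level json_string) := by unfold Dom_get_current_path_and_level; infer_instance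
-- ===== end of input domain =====

-- B restructures A (tokenizer + reducer with a depth counter); equivalence of the return value is proved on all inputs.

-- ===== PORT A =====
-- literal transliteration of A's single fused loop; the key accumulator is kept as List Char
def aLoop (chars : List Char) (stack : List Char) (path : List String)
    (key : List Char) (instr esc : Bool) : List String × Int :=
  match chars with
  | [] => (path, (stack.length : Int))
  | c :: rest =>
    if esc then
      aLoop rest stack path key instr false
    else if c = '"' then
      let instr' := !instr
      if instr' = false ∧ key ≠ [] then
        aLoop rest stack (path ++ [String.mk key]) [] instr' false
      else
        aLoop rest stack path key instr' false
    else if instr then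
      if c = '\\' then aLoop rest stack path key instr true
      else aLoop rest stack path (key ++ [c]) instr false
    else if c = '{' ∨ c = '[' then
      aLoop rest (stack ++ [c]) path key instr false
    else if c = '}' ∨ c = ']' then
      aLoop rest (if stack = [] then stack else stack.dropLast)
        (if path = [] then path else path.dropLast) key instr false
    else
      aLoop rest stack path key instr false

def get_current_path_and_level (json_string : String) : List String × Int :=
  aLoop json_string.toList [] [] [] false false

-- ===== PORT B =====
inductive PvTok where
  | key : String → PvTok
  | opn : PvTok
  | cls : PvTok
deriving DecidableEq, Repr

-- phase 1: tokenizer (port of _tokenize in Source B)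
def pvTokenize (chars : List Char) (buf : List Char) (instr esc : Bool) : List PvTok :=
  match chars with
  | [] => []
  | c :: rest =>
    if esc then
      pvTokenize rest buf instr false
    else if c = '"' then
      if instr then
        if buf ≠ [] then PvTok.key (String.mk buf) :: pvTokenize rest [] false false
        else pvTokenize rest buf false false
      else pvTokenize rest buf true false
    else if instr then
      if c = '\\' then pvTokenize rest buf instr true
      else pvTokenize rest (buf ++ [c]) instr false
    else if c = '{' ∨ c = '[' then
      PvTok.opn :: pvTokenize rest buf instr false
    else if c = '}' ∨ c = ']' then
      PvTok.cls :: pvTokenize rest buf instr false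
    else
      pvTokenize rest buf instr false

-- phase 2: reducer step over one token (the loop body of B)
def pvStep (st : Int × List String) (t : PvTok) : Int × List String :=
  match t with
  | PvTok.key s => (st.1, st.2 ++ [s])
  | PvTok.opn => (st.1 + 1, st.2)
  | PvTok.cls =>
      ((if st.1 ≠ 0 then st.1 - 1 else st.1),
       (if st.2 = [] then st.2 else st.2.dropLast))

def get_current_path_and_level_alt (json_string : String) : List String × Int :=
  let r := (pvTokenize json_string.toList [] false false).foldl pvStep (0, [])
  (r.2, r.1)

-- ===== PRECONDITION & SPEC =====
def Spec_get_current_path_and_level (json_string : String) (out : List String × Int) : Prop := out = get_current_path_and_level_alt json_string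
instance (json_string : String) (out : List String × Int) : Decidable (Spec_get_current_path_and_level json_string out) := by unfold Spec_get_current_path_and_level; infer_instance

-- ===== CLAIM (what is proved, stated in full; the proofs are below) =====
def Claim_equal_get_current_path_and_level : Prop := ∀ (json_string : String), Dom_get_current_path_and_level json_string → Spec_get_current_path_and_level json_string (get_current_path_and_level json_string)

-- ===== LEMMAS AND PROOFS =====

-- main invariant: A's fused loop equals the reducer folded over the tokens that
-- the tokenizer still emits, started from the current (depth, path) state.
theorem aLoop_eq_fold (chars : List Char) : ∀ (stack : List Char) (path : List String)
    (key : List Char) (instr esc : Bool),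
    aLoop chars stack path key instr esc =
      (let r := (pvTokenize chars key instr esc).foldl pvStep ((stack.length : Int), path)
       (r.2, r.1)) := by
  induction chars with
  | nil => intro stack path key instr esc; simp [aLoop, pvTokenize]
  | cons c rest ih =>
    intro stack path key instr esc
    by_cases hesc : esc = true
    · simp [aLoop, pvTokenize, hesc, ih]
    · simp only [Bool.not_eq_true] at hesc
      by_cases hq : c = '"'
      · subst hq hesc
        cases instr with
        | false => simp [aLoop, pvTokenize, ih]
        | true =>
          by_cases hk : key = []
          · simp [aLoop, pvTokenize, hk, ih]
          · simp [aLoop, pvTokenize, hk, ih, pvStep]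
      · subst hesc
        cases instr with
        | true =>
          by_cases hb : c = '\\'
          · simp [aLoop, pvTokenize, hq, hb, ih]
          · simp [aLoop, pvTokenize, hq, hb, ih]
        | false =>
          by_cases ho : c = '{' ∨ c = '['
          · simp [aLoop, pvTokenize, hq, ho, ih, pvStep]
          · by_cases hc : c = '}' ∨ c = ']'
            · simp only [aLoop, pvTokenize, hq, ho, hc, if_true, if_false,
                List.foldl_cons, ih]
              have hlen : ((if stack = [] then stack else stack.dropLast).length : Int) =
                  (if (stack.length : Int) ≠ 0 then (stack.length : Int) - 1 else (stack.length : Int)) := by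
                cases stack with
                | nil => simp
                | cons a l => simp [List.length_dropLast]; omega
              simp [pvStep, hlen]
            · simp [aLoop, pvTokenize, hq, ho, hc, ih]

-- ===== VERDICT (by name: the statement is the Claim_ definition above) =====
theorem get_current_path_and_level_spec : Claim_equal_get_current_path_and_level := by
  intro s _
  unfold Spec_get_current_path_and_level get_current_path_and_level get_current_path_and_level_alt
  simpa using aLoop_eq_fold s.toList [] [] [] false false
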